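-- pv_equiv track=rewrite | github.com/Didip-eu/ddpa_lines | apps/ddpa_lines/seglib.py | recover_labels_from_map_value
-- ===== SOURCE A (Python) =====
-- __LABEL_SIZE__=8
--
-- def recover_labels_from_map_value( px: int) -> list:
--     """
--     Retrieves intersecting polygon labels from a single map pixel value (for
--     diagnosis purpose: prohibitively slow on large arrays).
--
--     Args:
--         vl (int): a map pixel, whose value is a number in base __LABEL_SIZE__ (with digits being
--                   labels).
--     Output:
--         list: a list of labels
--     """
--     vl = px
--     labels = []
--     label_limit = 2**__LABEL_SIZE__-1
--     compound_label_limit = 2**(__LABEL_SIZE__*3)-1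
--     if px > compound_label_limit:
--         return []
--     while vl > label_limit:
--         labels.append( vl & label_limit )
--         vl >>= __LABEL_SIZE__
--     labels.append( vl )
--     return labels[::-1]
-- ===== SOURCE B (Python) =====
-- def recover_labels_from_map_value(px: int) -> list:
--     if px > 2**24 - 1:
--         return []
--     if px <= 255:
--         return [px]
--     n = (px.bit_length() + 7) // 8
--     return [(px >> (8 * i)) & 255 for i in range(n - 1, -1, -1)]
-- ===== Notes on version B (the rewrite author's own statement) =====
-- stated objective: idiomatic
-- what changed: A's consume-low-byte-and-reverse while loop is replaced by a length-first MSB-first positional extraction: compute the digit count from bit_length, then take each byte independently with a shift and mask, with an explicit single-byte branch for small values (which covers zero and negatives exactly as A does).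
import Mathlib
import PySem

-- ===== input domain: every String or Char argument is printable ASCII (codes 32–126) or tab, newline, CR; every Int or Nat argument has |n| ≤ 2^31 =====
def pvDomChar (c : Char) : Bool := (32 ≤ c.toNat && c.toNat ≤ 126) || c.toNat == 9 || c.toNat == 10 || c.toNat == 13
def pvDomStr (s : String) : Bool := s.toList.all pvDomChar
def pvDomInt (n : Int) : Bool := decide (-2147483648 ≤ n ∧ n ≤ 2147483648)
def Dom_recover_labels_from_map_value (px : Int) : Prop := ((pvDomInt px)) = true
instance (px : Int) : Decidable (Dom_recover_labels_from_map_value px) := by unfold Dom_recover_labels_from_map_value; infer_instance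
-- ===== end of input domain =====

-- B replaces A's consume-low-byte-and-reverse while loop with a length-first, MSB-first
-- positional extraction (digit count from bit_length, then one shift/mask per position): idiomatic.

-- ===== PORT A =====
-- A's while loop: 'while vl > label_limit: labels.append(vl & label_limit); vl >>= 8', then append vl
def pvLoopA (vl : Int) (labels : List Int) : List Int :=
  if vl > 255 then pvLoopA (vl >>> (8:Nat)) (labels ++ [PySem.Int.band vl 255])
  else labels ++ [vl]
termination_by vl.toNat
decreasing_by
  have h : vl >>> (8:Nat) = vl / 256 := by rw [Int.shiftRight_eq_div_pow]; norm_num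
  rw [h]; omega

def recover_labels_from_map_value (px : Int) : List Int :=
  if px > 2 ^ (8 * 3) - 1 then []
  else (pvLoopA px []).reverse      -- labels[::-1]

-- ===== PORT B =====
def recover_labels_from_map_value_alt (px : Int) : List Int :=
  if px > 2 ^ 24 - 1 then []
  else if px ≤ 255 then [px]
  else
    let n : Int := PySem.Int.floordiv ((PySem.Int.bitLength px : Int) + 7) 8
    -- every i from range(n-1,-1,-1) is ≥ 0 here; on such shifts Lean's Int '>>>' is Python's '>>'
    (PySem.List.pyRange (n - 1) (-1) (-1)).map (fun i => PySem.Int.band (px >>> (8 * i)) 255)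

-- ===== PRECONDITION & SPEC =====
def Spec_recover_labels_from_map_value (px : Int) (out : List Int) : Prop := out = recover_labels_from_map_value_alt px
instance (px : Int) (out : List Int) : Decidable (Spec_recover_labels_from_map_value px out) := by unfold Spec_recover_labels_from_map_value; infer_instance

-- ===== CLAIM (what is proved, stated in full; the proofs are below) =====
def Claim_equal_recover_labels_from_map_value : Prop := ∀ (px : Int), Dom_recover_labels_from_map_value px → Spec_recover_labels_from_map_value px (recover_labels_from_map_value px)

-- ===== LEMMAS AND PROOFS =====

theorem pv_band255 (a : Int) (h : 0 ≤ a) : PySem.Int.band a 255 = a % 256 := by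
  rw [PySem.Int.band_of_nonneg h (by norm_num)]
  have h2 := Nat.and_two_pow_sub_one_eq_mod a.toNat 8
  have h3 : (255:Int).toNat = 255 := by decide
  rw [h3]
  norm_num at h2
  rw [h2]
  omega

theorem pv_shr8 (a : Int) : a >>> (8:Nat) = a / 256 := by
  rw [Int.shiftRight_eq_div_pow]; norm_num

theorem pv_shr8i (a : Int) : a >>> (8:Int) = a / 256 := by
  rw [show ((8:Int)) = ((8:ℕ):Int) by norm_num, Int.shiftRight_natCast_right,
    Int.shiftRight_eq_div_pow]; norm_num

theorem pv_shr16i (a : Int) : a >>> (16:Int) = a / 65536 := by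
  rw [show ((16:Int)) = ((16:ℕ):Int) by norm_num, Int.shiftRight_natCast_right,
    Int.shiftRight_eq_div_pow]; norm_num

theorem pv_shr0i (a : Int) : a >>> (0:Int) = a := by
  rw [show ((0:Int)) = ((0:ℕ):Int) by norm_num, Int.shiftRight_natCast_right,
    Int.shiftRight_eq_div_pow]; norm_num

theorem pv_bl_bounds (px : Int) (lo k : Nat) (h1 : (2:Int) ^ lo ≤ px) (h2 : px < 2 ^ k) :
    lo < PySem.Int.bitLength px ∧ PySem.Int.bitLength px ≤ k := by
  have hpos : 0 < px := lt_of_lt_of_le (by positivity) h1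
  have hub := PySem.Int.lt_two_pow_bitLength px
  have hlb := PySem.Int.two_pow_bitLength_le px (by omega)
  have habs : px.natAbs = px.toNat := by omega
  rw [habs] at hub hlb
  have h1n : (2:ℕ) ^ lo ≤ px.toNat := by
    have : ((2:ℕ) ^ lo : Int) ≤ px := by push_cast; exact h1
    omega
  have h2n : px.toNat < 2 ^ k := by
    have : px < ((2:ℕ) ^ k : Int) := by push_cast; exact h2
    omega
  constructor
  · by_contra hc
    have hc' : PySem.Int.bitLength px ≤ lo := Nat.le_of_not_lt hc
    exact absurd (lt_of_le_of_lt h1n hub)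
      (not_lt.mpr (Nat.pow_le_pow_right (by norm_num) hc'))
  · by_contra hc
    have hc' : k < PySem.Int.bitLength px := Nat.lt_of_not_le hc
    have : (2:ℕ) ^ k ≤ 2 ^ (PySem.Int.bitLength px - 1) :=
      Nat.pow_le_pow_right (by norm_num) (by omega)
    omega

-- digit count n = (bit_length + 7) // 8
theorem pv_n_eq (bl : Nat) (q : Int) (hlo : 8 * q - 7 ≤ (bl:Int) ∧ (bl:Int) ≤ 8 * q) :
    PySem.Int.floordiv ((bl : Int) + 7) 8 = q := by
  rw [PySem.Int.floordiv_eq_ediv_of_pos (by norm_num)]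
  omega

theorem pvRange1 : PySem.List.pyRange 1 (-1) (-1) = [1, 0] := by decide
theorem pvRange2 : PySem.List.pyRange 2 (-1) (-1) = [2, 1, 0] := by decide

theorem recover_labels_from_map_value_spec : Claim_equal_recover_labels_from_map_value := by
  intro px _
  unfold Spec_recover_labels_from_map_value recover_labels_from_map_value recover_labels_from_map_value_alt
  by_cases h1 : px > 16777215
  · rw [if_pos (by norm_num; omega), if_pos (by norm_num; omega)]
  · rw [if_neg (by norm_num; omega), if_neg (by norm_num; omega)]
    by_cases h2 : px ≤ 255
    · rw [if_pos h2, pvLoopA, if_neg (by omega)]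
      simp
    · rw [if_neg h2]
      by_cases h3 : px < 65536
      · -- two bytes
        obtain ⟨hb1, hb2⟩ := pv_bl_bounds px 8 16 (by norm_num; omega) (by norm_num; omega)
        simp only [pv_n_eq (PySem.Int.bitLength px) 2 (by omega),
          show (2:Int) - 1 = 1 by decide, pvRange1, List.map_cons, List.map_nil,
          show (8:Int) * 1 = 8 by norm_num, show (8:Int) * 0 = 0 by norm_num,
          pv_shr8i, pv_shr0i]
        rw [pvLoopA, if_pos (by omega), pv_shr8, pvLoopA, if_neg (by omega)]
        simp only [List.nil_append, List.cons_append, List.reverse_cons, List.reverse_nil]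
        rw [pv_band255 px (by omega), pv_band255 (px / 256) (by omega)]
        simp only [List.cons.injEq, and_true]
        omega
      · -- three bytes
        obtain ⟨hb1, hb2⟩ := pv_bl_bounds px 16 24 (by norm_num; omega) (by norm_num; omega)
        simp only [pv_n_eq (PySem.Int.bitLength px) 3 (by omega),
          show (3:Int) - 1 = 2 by decide, pvRange2, List.map_cons, List.map_nil,
          show (8:Int) * 2 = 16 by norm_num, show (8:Int) * 1 = 8 by norm_num,
          show (8:Int) * 0 = 0 by norm_num, pv_shr8i, pv_shr16i, pv_shr0i]
        rw [pvLoopA, if_pos (by omega), pv_shr8, pvLoopA, if_pos (by omega), pv_shr8,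
          pvLoopA, if_neg (by omega)]
        simp only [List.nil_append, List.cons_append, List.reverse_cons, List.reverse_nil]
        rw [pv_band255 px (by omega), pv_band255 (px / 256) (by omega),
          pv_band255 (px / 65536) (by omega)]
        simp only [List.cons.injEq, and_true]
        omega
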